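-- pv_equiv track=rewrite | github.com/zvdy/HackerRank | algorithms/Strings/gem-stones/gem-stones.py | gemstones
-- ===== SOURCE A (Python) =====
-- def gemstones(arr):
--     # Write your code here
--     # gem stones hackerrank
--     #
-- #There may be multiple occurrences of a mineral in a rock. A mineral is called a gemstone if it occurs at least once in each of the rocks in the collection.
-- #Given a list of minerals embedded in each of the rocks, display the number of types of gemstones in the collection.
--     if len(arr) == 1:
--         return len(arr[0])
--     else:
--         gems = set(arr[0])
--         for i in range(1, len(arr)):
--             gems = gems.intersection(set(arr[i]))
--         return len(gems)
-- ===== SOURCE B (Python) =====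
-- def gemstones(arr):
--     # Candidate-filter formulation: a gemstone must occur in the first rock,
--     # so count the distinct characters of arr[0] present in every other rock.
--     first, rest = arr[0], arr[1:]
--     return sum(1 for c in set(first) if all(c in r for r in rest))
-- ===== Notes on version B (the rewrite author's own statement) =====
-- stated objective: simpler
-- what changed: Replaces the progressive fold of set intersections (and the special single-rock branch) with a single filter: count the distinct characters of the first rock that occur in every remaining rock, building no intermediate intersection sets.
-- intended difference: On a single-rock input whose rock contains a repeated mineral, A returns len(arr[0]) counting duplicates, while B returns the number of distinct minerals, which is the number of gemstone types the problem asks for. — e.g. on gemstones(["aa"]): A returns 2, B returns 1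
import Mathlib
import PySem

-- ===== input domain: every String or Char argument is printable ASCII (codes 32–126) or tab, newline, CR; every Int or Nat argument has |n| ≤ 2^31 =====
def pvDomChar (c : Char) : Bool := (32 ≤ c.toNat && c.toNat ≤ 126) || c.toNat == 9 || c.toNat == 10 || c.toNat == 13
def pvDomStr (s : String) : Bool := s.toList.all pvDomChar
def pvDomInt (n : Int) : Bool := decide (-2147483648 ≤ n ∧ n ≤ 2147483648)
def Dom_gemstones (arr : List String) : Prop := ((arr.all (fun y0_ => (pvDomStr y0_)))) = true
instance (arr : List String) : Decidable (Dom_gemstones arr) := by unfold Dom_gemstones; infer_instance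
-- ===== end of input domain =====

-- B counts the distinct characters of the first rock that occur in every other rock, instead of
-- A's progressive fold of set intersections with a special single-rock branch (objective: simpler).

-- ===== PORT A =====
def gemstones (arr : List String) : Int :=
  if PySem.List.len arr == 1 then
    match PySem.List.pyGet? arr 0 with          -- arr[0]; none = IndexError, excluded by Pre_
    | some s => PySem.Str.len s
    | none => 0
  else
    match PySem.List.pyGet? arr 0 with          -- arr[0]; none = IndexError, excluded by Pre_
    | none => 0
    | some s0 =>
      -- gems = set(arr[0]); for i in range(1, len(arr)): gems = gems.intersection(set(arr[i]))
      let gems := (PySem.List.pyRange 1 (PySem.List.len arr) 1).foldl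
        (fun gems i =>
          PySem.Set.inter gems (PySem.Set.ofList (PySem.List.pyGetD arr i "").toList))
        (PySem.Set.ofList s0.toList)
      (PySem.Set.len gems : Int)

-- ===== PORT B =====
def gemstones_alt (arr : List String) : Int :=
  match PySem.List.pyGet? arr 0 with            -- first = arr[0]; none = IndexError
  | none => 0
  | some first =>
    let rest := PySem.List.slice arr (some 1) none     -- rest = arr[1:]
    -- sum(1 for c in set(first) if all(c in r for r in rest))
    (((PySem.Set.ofList first.toList).countP
        (fun c => rest.all (fun r => PySem.Str.isIn (String.ofList [c]) r)) : Nat) : Int)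

-- ===== PRECONDITION & SPEC =====
-- Pre_ excludes only the empty list, on which both Pythons raise IndexError at arr[0].
def Pre_gemstones (arr : List String) : Prop := arr ≠ []
instance (arr : List String) : Decidable (Pre_gemstones arr) := by unfold Pre_gemstones; infer_instance
def pvWitness_gemstones : List String := (["abc", "bcd"])

-- On single-rock inputs whose rock has a repeated character, A returns len(arr[0]) counting
-- duplicates, while B returns the number of distinct minerals — the number of gemstone types
-- the problem asks for, hence the intended value.
def D_gemstones (arr : List String) : Prop := arr.length = 1 ∧ ¬ (arr.headD "").toList.Nodup
instance (arr : List String) : Decidable (D_gemstones arr) := by unfold D_gemstones; infer_instance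

def Spec_gemstones (arr : List String) (out : Int) : Prop := ¬ D_gemstones arr → out = gemstones_alt arr
instance (arr : List String) (out : Int) : Decidable (Spec_gemstones arr out) := by unfold Spec_gemstones; infer_instance

def pvDiffWitness_gemstones : List String := (["aa"])
def pvDiffWitnessOut_gemstones : Int × Int := (2, 1)

-- ===== CLAIM (what is proved, stated in full; the proofs are below) =====
def Claim_unchanged_gemstones : Prop := ∀ (arr : List String), Dom_gemstones arr → Pre_gemstones arr → Spec_gemstones arr (gemstones arr)
def Claim_changed_gemstones : Prop := Dom_gemstones (pvDiffWitness_gemstones) ∧ Pre_gemstones (pvDiffWitness_gemstones) ∧ D_gemstones (pvDiffWitness_gemstones) ∧ gemstones (pvDiffWitness_gemstones) = pvDiffWitnessOut_gemstones.1 ∧ gemstones_alt (pvDiffWitness_gemstones) = pvDiffWitnessOut_gemstones.2 ∧ pvDiffWitnessOut_gemstones.1 ≠ pvDiffWitnessOut_gemstones.2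
def Claim_exact_gemstones : Prop := ∀ (arr : List String), Dom_gemstones arr → Pre_gemstones arr → D_gemstones arr → gemstones arr ≠ gemstones_alt arr

-- ===== LEMMAS AND PROOFS =====

-- 'c in r' for a single character c is membership of c among r's characters
lemma isIn_singleton (c : Char) (r : String) :
    PySem.Str.isIn (String.ofList [c]) r = r.toList.contains c := by
  rw [Bool.eq_iff_iff]
  simp [PySem.Chars.isIn_iff_infix, List.singleton_infix_iff]

-- A's intersection fold is a filter by "present in every remaining rock"
lemma foldl_inter_eq_filter (rest : List String) (g : List Char) :
    rest.foldl (fun g s => PySem.Set.inter g (PySem.Set.ofList s.toList)) g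
      = g.filter (fun c => rest.all (fun r => r.toList.contains c)) := by
  induction rest generalizing g with
  | nil => simp
  | cons r rs ih =>
    rw [List.foldl_cons, ih, PySem.Set.inter, List.filter_filter]
    congr 1
    funext c
    simp [PySem.Set.mem_ofList, Bool.and_comm]

-- a list with a duplicate dedups strictly
lemma ofList_length_lt (l : List Char) (h : ¬ l.Nodup) :
    (PySem.Set.ofList l).length < l.length := by
  induction l with
  | nil => simp at h
  | cons x xs ih =>
    rw [PySem.Set.ofList_cons]
    by_cases hx : xs.Nodup
    · have hm : x ∈ PySem.Set.ofList xs := by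
        rw [PySem.Set.mem_ofList]; simpa [hx] using h
      have h1 : (PySem.Set.discard (PySem.Set.ofList xs) x).length < (PySem.Set.ofList xs).length := by
        unfold PySem.Set.discard
        refine lt_of_le_of_ne (List.length_filter_le _ _) fun he => ?_
        have heq := (List.filter_sublist (l := PySem.Set.ofList xs)).eq_of_length he
        have := List.mem_filter.mp (heq ▸ hm)
        simp at this
      have h2 := PySem.Set.length_ofList_le xs
      simp only [List.length_cons]
      omega
    · have h1 := ih hx
      have h2 : (PySem.Set.discard (PySem.Set.ofList xs) x).length ≤ (PySem.Set.ofList xs).length :=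
        List.length_filter_le _ _
      simp only [List.length_cons]
      omega

lemma gemstones_eq_alt (arr : List String) (hpre : arr ≠ [])
    (hnd : ¬ (arr.length = 1 ∧ ¬ (arr.headD "").toList.Nodup)) :
    gemstones arr = gemstones_alt arr := by
  obtain ⟨first, rest, rfl⟩ : ∃ f r, arr = f :: r := by
    cases arr with | nil => exact absurd rfl hpre | cons a l => exact ⟨a, l, rfl⟩
  have hget : PySem.List.pyGet? (first :: rest) 0 = some first := by
    simp [PySem.List.pyGet?, PySem.List.pyIdx?]
  have hslice : PySem.List.slice (first :: rest) (some 1) none = rest := by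
    rw [PySem.List.slice_from_one]; rfl
  unfold gemstones gemstones_alt
  rw [hget, hslice]
  simp only [isIn_singleton]
  cases rest with
  | nil =>
    have hnodup : first.toList.Nodup := by
      by_contra h; exact hnd ⟨rfl, by simpa using h⟩
    simp only [PySem.List.len, List.length_cons, List.length_nil]
    norm_num
    rw [PySem.Set.ofList_eq_self_of_nodup first.toList hnodup]
    simp
  | cons r rs =>
    have hne : (PySem.List.len (first :: r :: rs) == (1:Int)) = false := by
      simp [PySem.List.len]; omega
    rw [hne]
    simp only [Bool.false_eq_true, if_false]
    rw [PySem.List.foldl_pyRange_pyGetD (xs := first :: r :: rs) (d := "")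
      (f := fun g s => PySem.Set.inter g (PySem.Set.ofList s.toList))
      (init := PySem.Set.ofList first.toList) (a := 1) (by norm_num)]
    show ((PySem.Set.len (List.foldl (fun g s => PySem.Set.inter g (PySem.Set.ofList s.toList))
        (PySem.Set.ofList first.toList) (r :: rs)) : Int)) = _
    rw [foldl_inter_eq_filter]
    simp [PySem.Set.len, List.countP_eq_length_filter]

-- ===== VERDICT (by name: the statement is the Claim_ definition above) =====
theorem gemstones_spec : Claim_unchanged_gemstones := by
  intro arr _ hpre hnd
  exact gemstones_eq_alt arr hpre hnd

theorem gemstones_changed : Claim_changed_gemstones := by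
  unfold Claim_changed_gemstones; decide

theorem gemstones_tight : Claim_exact_gemstones := by
  intro arr _ hpre hd
  obtain ⟨h1, h2⟩ := hd
  obtain ⟨s, rfl⟩ : ∃ s, arr = [s] := by
    cases arr with
    | nil => exact absurd rfl hpre
    | cons a l => cases l with
      | nil => exact ⟨a, rfl⟩
      | cons b m => simp at h1
  have h2' : ¬ s.toList.Nodup := by simpa using h2
  have hlt := ofList_length_lt s.toList h2'
  unfold gemstones gemstones_alt
  have hget : PySem.List.pyGet? [s] 0 = some s := by
    simp [PySem.List.pyGet?, PySem.List.pyIdx?]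
  rw [hget]
  have hslice : PySem.List.slice [s] (some 1) none = [] := by
    rw [PySem.List.slice_from_one]; rfl
  rw [hslice]
  simp only [PySem.List.len, List.length_cons, List.length_nil]
  norm_num
  have hl : s.toList.length = s.length := by simp
  omega
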